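-- pv_equiv track=rewrite | github.com/tomohawkyo-droid/AMI-DATAOPS | ami/implementations/graph/dgraph_traversal.py | _build_traverse_query
-- ===== SOURCE A (Python) =====
-- def _build_traverse_query(start_uid: str, edge_path: list[str]) -> str:
--     """Build a nested query for graph traversal."""
--     query_parts = []
--
--     for i, edge in enumerate(edge_path):
--         indent = "  " * i
--         query_parts.append(f"{indent}{edge} {{")
--
--         if i == len(edge_path) - 1:
--             query_parts.append(f"{indent}  uid")
--             query_parts.append(f"{indent}  expand(_all_)")
--         else:
--             query_parts.append(f"{indent}  uid")
--
--     # Close all brackets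
--     for i in range(len(edge_path) - 1, -1, -1):
--         indent = "  " * i
--         query_parts.append(f"{indent}}}")
--
--     return (
--         "{{\n"
--         "    path(func: uid({})) {{\n"
--         "        uid\n"
--         "        {}\n"
--         "    }}\n"
--         "}}".format(start_uid, "\n        ".join(query_parts))
--     )
-- ===== SOURCE B (Python) =====
-- def _build_traverse_query(start_uid: str, edge_path: list[str]) -> str:
--     """Build a nested query for graph traversal (recursive nesting)."""
--
--     def go(path, depth):
--         if not path:
--             return []
--         indent = "  " * depth
--         parts = [indent + path[0] + " {", indent + "  uid"]
--         if len(path) == 1: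
--             parts.append(indent + "  expand(_all_)")
--         else:
--             parts += go(path[1:], depth + 1)
--         parts.append(indent + "}")
--         return parts
--
--     return (
--         "{\n"
--         "    path(func: uid(" + start_uid + ")) {\n"
--         "        uid\n"
--         "        " + "\n        ".join(go(edge_path, 0)) + "\n"
--         "    }\n"
--         "}"
--     )
-- ===== Notes on version B (the rewrite author's own statement) =====
-- stated objective: alternative
-- what changed: Replaced A's two sequential loops (one opening each nesting level, one counting back down to close the brackets) with a single recursive helper that walks the tail of edge_path, emitting each level's opening lines and appending its closing brace after the recursive call.
import Mathlib
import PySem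

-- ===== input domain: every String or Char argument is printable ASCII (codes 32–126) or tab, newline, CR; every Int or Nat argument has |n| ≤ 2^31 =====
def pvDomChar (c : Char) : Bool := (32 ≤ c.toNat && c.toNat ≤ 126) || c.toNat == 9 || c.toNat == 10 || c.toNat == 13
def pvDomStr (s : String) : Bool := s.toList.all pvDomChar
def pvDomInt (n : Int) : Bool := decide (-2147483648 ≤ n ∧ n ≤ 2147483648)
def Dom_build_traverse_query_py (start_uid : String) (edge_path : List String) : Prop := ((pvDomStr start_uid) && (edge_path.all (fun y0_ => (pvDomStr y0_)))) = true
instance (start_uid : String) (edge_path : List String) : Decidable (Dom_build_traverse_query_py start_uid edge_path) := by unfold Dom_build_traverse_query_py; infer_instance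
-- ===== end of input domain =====

-- B replaces A's open-loop + close-loop pair by one recursive descent that closes each
-- level after its nested body (objective: alternative decomposition, same cost).

-- '"  " * i' (shared by both Pythons)
def pvIndent (i : Nat) : List Char := (List.replicate i "  ".toList).flatten

-- ===== PORT A =====
def build_traverse_query_py (start_uid : String) (edge_path : List String) : String :=
  let n : Int := PySem.List.len edge_path
  -- first loop: for i, edge in enumerate(edge_path)
  let query_parts : List (List Char) :=
    (PySem.List.enumerate edge_path 0).foldl (fun acc p =>
      let indent := pvIndent p.1.toNat
      let acc := acc ++ [indent ++ p.2.toList ++ " {".toList]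
      if p.1 = n - 1 then
        (acc ++ [indent ++ "  uid".toList]) ++ [indent ++ "  expand(_all_)".toList]
      else
        acc ++ [indent ++ "  uid".toList]) []
  -- second loop: for i in range(len(edge_path) - 1, -1, -1)
  let query_parts :=
    (PySem.List.pyRange (n - 1) (-1) (-1)).foldl
      (fun acc i => acc ++ [pvIndent i.toNat ++ "}".toList]) query_parts
  String.ofList
    ("{\n    path(func: uid(".toList ++ start_uid.toList ++ ")) {\n        uid\n        ".toList
      ++ PySem.Chars.join "\n        ".toList query_parts
      ++ "\n    }\n}".toList)

-- ===== PORT B =====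
-- helper 'go(path, depth)' of Source B
def pvGoB : List String → Nat → List (List Char)
  | [], _ => []
  | e :: rest, depth =>
    let indent := pvIndent depth
    let parts := [indent ++ e.toList ++ " {".toList, indent ++ "  uid".toList]
    let parts :=
      if rest = [] then parts ++ [indent ++ "  expand(_all_)".toList]
      else parts ++ pvGoB rest (depth + 1)
    parts ++ [indent ++ "}".toList]

def build_traverse_query_py_alt (start_uid : String) (edge_path : List String) : String :=
  String.ofList
    ("{\n    path(func: uid(".toList ++ start_uid.toList ++ ")) {\n        uid\n        ".toList
      ++ PySem.Chars.join "\n        ".toList (pvGoB edge_path 0)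
      ++ "\n    }\n}".toList)

-- ===== PRECONDITION & SPEC =====
def Spec_build_traverse_query_py (start_uid : String) (edge_path : List String) (out : String) : Prop := out = build_traverse_query_py_alt start_uid edge_path
instance (start_uid : String) (edge_path : List String) (out : String) : Decidable (Spec_build_traverse_query_py start_uid edge_path out) := by unfold Spec_build_traverse_query_py; infer_instance

-- ===== CLAIM (what is proved, stated in full; the proofs are below) =====
def Claim_equal_build_traverse_query_py : Prop := ∀ (start_uid : String) (edge_path : List String), Dom_build_traverse_query_py start_uid edge_path → Spec_build_traverse_query_py start_uid edge_path (build_traverse_query_py start_uid edge_path)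

-- ===== LEMMAS AND PROOFS =====

-- the opening lines of A for the suffix of edge_path that starts at absolute index s (n = total length)
def pvOpen : List String → Nat → Nat → List (List Char)
  | [], _, _ => []
  | e :: rest, s, n =>
    (pvIndent s ++ e.toList ++ " {".toList) :: (pvIndent s ++ "  uid".toList) ::
      ((if s = n - 1 then [pvIndent s ++ "  expand(_all_)".toList] else []) ++ pvOpen rest (s + 1) n)

-- the closing lines "ind(n-1)}", …, "ind(s)}"
def pvClose (s : Nat) : Nat → List (List Char)
  | 0 => []
  | m + 1 => if s ≤ m then (pvIndent m ++ "}".toList) :: pvClose s m else []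

lemma pvClose_ge (s n : Nat) (h : n ≤ s) : pvClose s n = [] := by
  cases n with
  | zero => rfl
  | succ m => simp [pvClose, Nat.not_le.mpr (by omega : m < s)]

lemma pvClose_peel (s n : Nat) (h : s < n) :
    pvClose s n = pvClose (s + 1) n ++ [pvIndent s ++ "}".toList] := by
  induction n with
  | zero => omega
  | succ m ih =>
    by_cases hs : s = m
    · subst hs
      simp [pvClose, pvClose_ge]
    · have hsm : s < m := by omega
      simp [pvClose, Nat.le_of_lt hsm, Nat.succ_le_of_lt hsm, ih hsm]

lemma pvGoB_eq (ep : List String) (s n : Nat) (h : s + ep.length = n) (hne : ep ≠ []) :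
    pvGoB ep s = pvOpen ep s n ++ pvClose s n := by
  induction ep generalizing s with
  | nil => exact absurd rfl hne
  | cons e rest ih =>
    by_cases hr : rest = []
    · subst hr
      have hs : s = n - 1 := by simp at h; omega
      have hn : s < n := by simp at h; omega
      simp only [pvGoB, pvOpen, if_pos hs]
      rw [pvClose_peel s n hn, pvClose_ge (s + 1) n (by simp at h; omega)]
      simp
    · have hlr : 0 < rest.length := List.length_pos_of_ne_nil hr
      have hs : s ≠ n - 1 := by simp at h; omega
      have hn : s < n := by simp at h; omega
      simp only [pvGoB, pvOpen, if_neg hr, if_neg hs]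
      rw [ih (s + 1) (by simp at h ⊢; omega) hr, pvClose_peel s n hn]
      simp

-- A's first loop (in zeta-reduced form) computes pvOpen
lemma foldA_open (ep : List String) (s : Int) (hs : 0 ≤ s) (n : Int) (h : s + ep.length = n)
    (acc : List (List Char)) :
    (PySem.List.enumerate ep s).foldl (fun acc p =>
      if p.1 = n - 1 then
        acc ++ [pvIndent p.1.toNat ++ p.2.toList ++ " {".toList] ++ [pvIndent p.1.toNat ++ "  uid".toList] ++
          [pvIndent p.1.toNat ++ "  expand(_all_)".toList]
      else acc ++ [pvIndent p.1.toNat ++ p.2.toList ++ " {".toList] ++ [pvIndent p.1.toNat ++ "  uid".toList]) acc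
    = acc ++ pvOpen ep s.toNat n.toNat := by
  induction ep generalizing s acc with
  | nil => simp [PySem.List.enumerate_nil, pvOpen]
  | cons e rest ih =>
    rw [PySem.List.enumerate_cons]
    simp only [List.foldl_cons]
    have hlen : (rest.length : Int) = n - s - 1 := by simp at h; omega
    have hst : (s + 1).toNat = s.toNat + 1 := by omega
    have hrec := ih (s + 1) (by omega) (by simp at h ⊢; omega)
    by_cases hc : s = n - 1
    · rw [if_pos hc, hrec]
      have hc' : s.toNat = n.toNat - 1 := by omega
      simp [pvOpen, if_pos hc', hst]
    · rw [if_neg hc, hrec]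
      have hc' : ¬ s.toNat = n.toNat - 1 := by omega
      simp [pvOpen, if_neg hc', hst]

-- A's second loop computes pvClose 0
lemma foldA_close (n : Nat) (acc : List (List Char)) :
    (PySem.List.pyRange ((n : Int) - 1) (-1) (-1)).foldl
      (fun acc i => acc ++ [pvIndent i.toNat ++ "}".toList]) acc
    = acc ++ pvClose 0 n := by
  induction n generalizing acc with
  | zero =>
    rw [PySem.List.pyRange_neg_one_eq_nil (by omega)]
    simp [pvClose]
  | succ m ih =>
    rw [show ((m + 1 : Nat) : Int) - 1 = (m : Int) by push_cast; ring,
        PySem.List.pyRange_neg_one_cons (by omega)]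
    simp only [List.foldl_cons]
    rw [show (m : Int) - 1 = ((m : Nat) : Int) - 1 by rfl, ih]
    have : ((m : Int)).toNat = m := by omega
    simp [pvClose, this]

-- the two loop results of A equal B's recursion
lemma parts_eq (ep : List String) :
    (PySem.List.pyRange ((ep.length : Int) - 1) (-1) (-1)).foldl
      (fun acc i => acc ++ [pvIndent i.toNat ++ "}".toList])
      ((PySem.List.enumerate ep (0 : Int)).foldl (fun acc p =>
        if p.1 = (ep.length : Int) - 1 then
          acc ++ [pvIndent p.1.toNat ++ p.2.toList ++ " {".toList] ++ [pvIndent p.1.toNat ++ "  uid".toList] ++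
            [pvIndent p.1.toNat ++ "  expand(_all_)".toList]
        else acc ++ [pvIndent p.1.toNat ++ p.2.toList ++ " {".toList] ++ [pvIndent p.1.toNat ++ "  uid".toList]) [])
    = pvGoB ep 0 := by
  rw [foldA_open ep 0 (by norm_num) ((ep.length : Int)) (by simp), foldA_close ep.length]
  have h0 : (0 : Int).toNat = 0 := rfl
  have h1 : ((ep.length : Int)).toNat = ep.length := by omega
  rw [h0, h1, List.nil_append]
  cases ep with
  | nil => simp [pvOpen, pvClose, pvGoB]
  | cons e rest =>
    rw [pvGoB_eq (e :: rest) 0 (e :: rest).length (by omega) (by simp)]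

-- ===== VERDICT (by name: the statement is the Claim_ definition above) =====
theorem build_traverse_query_py_spec : Claim_equal_build_traverse_query_py := by
  unfold Claim_equal_build_traverse_query_py
  intro start_uid edge_path _
  unfold Spec_build_traverse_query_py build_traverse_query_py build_traverse_query_py_alt
  have hp := parts_eq edge_path
  have hlen : PySem.List.len edge_path = (edge_path.length : Int) := by
    simp [PySem.List.len_eq]
  simp only [hlen, hp]
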